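-- pv_equiv track=rewrite | github.com/kuttelbalint/BEVADAT2022232 | GYAK/GYAK01/GYAK01.py | is_odd
-- ===== SOURCE A (Python) =====
-- def is_odd(input_list):
--     maskedList = []
--
--     for i in range(len(input_list)):
--         if i != 0:
--             if i % 2 == 1:
--                 maskedList.append(True)
--             else:
--                 maskedList.append(False)
--
--     return maskedList
-- ===== SOURCE B (Python) =====
-- def is_odd(input_list):
--     m = max(len(input_list) - 1, 0)
--     return ([True, False] * ((m + 1) // 2))[:m]
-- ===== Notes on version B (the rewrite author's own statement) =====
-- stated objective: idiomatic
-- what changed: B builds the fixed alternating [True, False, ...] pattern of length len(input_list)-1 by repeating and slicing a two-element base pattern, instead of looping over every index and branching on i != 0 and i % 2.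
import Mathlib
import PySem

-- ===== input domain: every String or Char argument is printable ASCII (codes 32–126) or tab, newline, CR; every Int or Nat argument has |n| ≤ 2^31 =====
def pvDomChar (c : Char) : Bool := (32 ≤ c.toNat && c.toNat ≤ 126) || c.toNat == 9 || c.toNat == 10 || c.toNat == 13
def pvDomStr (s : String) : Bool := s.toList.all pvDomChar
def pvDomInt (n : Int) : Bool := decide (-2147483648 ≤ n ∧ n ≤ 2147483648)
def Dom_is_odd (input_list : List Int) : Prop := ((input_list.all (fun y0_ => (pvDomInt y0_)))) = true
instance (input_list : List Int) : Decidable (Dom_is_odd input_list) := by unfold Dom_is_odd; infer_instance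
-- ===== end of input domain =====

-- B builds the alternating pattern by repeating [true, false] and truncating,
-- instead of A's per-index loop with a parity branch (objective: idiomatic).

-- ===== PORT A =====
-- for i in range(len(input_list)): if i != 0: append(i % 2 == 1)
def is_odd (input_list : List Int) : List Bool :=
  (PySem.List.pyRange 0 (input_list.length : Int) 1).foldl
    (fun maskedList i =>
      if i ≠ 0 then
        if i % 2 == 1 then maskedList ++ [true] else maskedList ++ [false]
      else maskedList) []

-- ===== PORT B =====
-- m = max(len(l)-1, 0)  (Nat subtraction is exactly this max); [True,False]*k is
-- (List.replicate k [true,false]).flatten; [:m] is List.take m.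
def is_odd_alt (input_list : List Int) : List Bool :=
  let m := input_list.length - 1
  ((List.replicate ((m + 1) / 2) [true, false]).flatten).take m

-- ===== PRECONDITION & SPEC =====
def Spec_is_odd (input_list : List Int) (out : List Bool) : Prop := out = is_odd_alt input_list
instance (input_list : List Int) (out : List Bool) : Decidable (Spec_is_odd input_list out) := by unfold Spec_is_odd; infer_instance

-- ===== CLAIM (what is proved, stated in full; the proofs are below) =====
def Claim_equal_is_odd : Prop := ∀ (input_list : List Int), Dom_is_odd input_list → Spec_is_odd input_list (is_odd input_list)

-- ===== LEMMAS AND PROOFS =====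

-- the common reference pattern: pat m = [true, false, true, …] of length m
def pat : Nat → List Bool
  | 0 => []
  | 1 => [true]
  | (m + 2) => true :: false :: pat m

theorem pat_snoc : ∀ m : Nat, pat (m + 1) = pat m ++ [decide (m % 2 = 0)]
  | 0 => rfl
  | 1 => rfl
  | (m + 2) => by
    have h : (m + 2) % 2 = m % 2 := by omega
    show true :: false :: pat (m + 1) = true :: false :: pat m ++ [decide ((m + 2) % 2 = 0)]
    rw [pat_snoc m, h]
    simp

theorem alt_eq_pat : ∀ m : Nat,
    ((List.replicate ((m + 1) / 2) [true, false]).flatten).take m = pat m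
  | 0 => by simp [pat]
  | 1 => rfl
  | (m + 2) => by
    have h : (m + 2 + 1) / 2 = (m + 1) / 2 + 1 := by omega
    rw [h]
    have : List.replicate ((m + 1) / 2 + 1) [true, false]
        = [true, false] :: List.replicate ((m + 1) / 2) [true, false] := by
      simp [List.replicate_succ]
    rw [this]
    simpa [pat, List.flatten] using alt_eq_pat m

theorem a_eq_pat : ∀ n : Nat,
    (PySem.List.pyRange 0 (n : Int) 1).foldl
      (fun maskedList i =>
        if i ≠ 0 then
          if i % 2 == 1 then maskedList ++ [true] else maskedList ++ [false]
        else maskedList) [] = pat (n - 1) := by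
  intro n
  induction n with
  | zero => simp [pat]
  | succ k ih =>
    have hr : PySem.List.pyRange 0 ((k + 1 : Nat) : Int) 1
        = PySem.List.pyRange 0 (k : Int) 1 ++ [(k : Int)] := by
      have := PySem.List.pyRange_one_succ_right (a := 0) (b := (k : Int)) (by omega)
      simpa using this
    rw [hr, List.foldl_append, ih]
    cases k with
    | zero => simp
    | succ j =>
      have hne : ((j + 1 : Nat) : Int) ≠ 0 := by omega
      simp only [List.foldl_cons, List.foldl_nil, if_pos hne]
      have hsub : (j + 1) - 1 = j := by omega
      have hsub2 : (j + 2) - 1 = j + 1 := by omega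
      rw [hsub, hsub2, pat_snoc j]
      by_cases hj : j % 2 = 0
      · simp [hj]
        omega
      · simp [hj]
        omega

-- ===== VERDICT (by name: the statement is the Claim_ definition above) =====
theorem is_odd_spec : Claim_equal_is_odd := by
  intro input_list _
  unfold Spec_is_odd is_odd is_odd_alt
  rw [a_eq_pat input_list.length, alt_eq_pat (input_list.length - 1)]
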